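-- pv_equiv track=rewrite | github.com/JosuaKugler/competitions | bwinf/A2.py | middleanagramm
-- ===== SOURCE A (Python) =====
-- def middleanagramm(word1,word2):
--     """
--     Input:  Zwei Wörter
--     Output: True  wenn die mittleren Buchstaben der beiden Wörter ein Anagramm bilden
--             False ansonsten
--     """
--     wordlist1=list(word1)[1:-1]
--     wordlist2=list(word2)[1:-1]
--     for i in wordlist1:
--         if i in wordlist2:
--             wordlist2.remove(i)
--         else:
--             return False
--     if len(wordlist2)>0:
--         return False
--     return True
-- ===== SOURCE B (Python) =====
-- def middleanagramm(word1, word2):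
--     """Sort-then-compare: the middles are anagrams iff their sorted letters coincide."""
--     return sorted(word1[1:-1]) == sorted(word2[1:-1])
-- ===== Notes on version B (the rewrite author's own statement) =====
-- stated objective: faster
-- what changed: Replaces A's scan-and-remove multiset loop (membership test plus list.remove per letter, quadratic) with a one-line sort-then-compare of the two middle substrings.
import Mathlib
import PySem

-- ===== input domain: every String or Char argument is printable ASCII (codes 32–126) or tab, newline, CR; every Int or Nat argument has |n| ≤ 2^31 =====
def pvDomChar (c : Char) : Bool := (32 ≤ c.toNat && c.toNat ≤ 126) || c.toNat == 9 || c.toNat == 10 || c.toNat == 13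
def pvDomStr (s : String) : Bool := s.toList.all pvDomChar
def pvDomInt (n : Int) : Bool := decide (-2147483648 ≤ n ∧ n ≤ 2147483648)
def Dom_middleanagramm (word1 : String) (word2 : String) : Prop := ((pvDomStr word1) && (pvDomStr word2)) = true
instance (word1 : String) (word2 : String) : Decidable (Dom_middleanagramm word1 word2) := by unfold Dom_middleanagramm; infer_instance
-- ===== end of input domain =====

-- B replaces A's scan-and-remove multiset loop with a one-line sort-then-compare of the two middles (simpler).

-- ===== PORT A =====
-- the 'for i in wordlist1' loop: remove each letter from wordlist2, early-return False on a miss,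
-- then 'if len(wordlist2) > 0: return False; return True'
def middleanagrammLoop : List Char → List Char → Bool
  | [], l2 => !decide (l2.length > 0)
  | i :: rest, l2 =>
      match PySem.List.remove? l2 i with      -- 'if i in wordlist2: wordlist2.remove(i) else: return False'
      | some l2' => middleanagrammLoop rest l2'
      | none => false

def middleanagramm (word1 : String) (word2 : String) : Bool :=
  let wordlist1 := PySem.List.slice word1.toList (some 1) (some (-1))
  let wordlist2 := PySem.List.slice word2.toList (some 1) (some (-1))
  middleanagrammLoop wordlist1 wordlist2

-- ===== PORT B =====
def middleanagramm_alt (word1 : String) (word2 : String) : Bool :=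
  PySem.List.sorted (PySem.List.slice word1.toList (some 1) (some (-1))) (fun x => x) false
    == PySem.List.sorted (PySem.List.slice word2.toList (some 1) (some (-1))) (fun x => x) false

-- ===== PRECONDITION & SPEC =====
def Spec_middleanagramm (word1 : String) (word2 : String) (out : Bool) : Prop := out = middleanagramm_alt word1 word2
instance (word1 : String) (word2 : String) (out : Bool) : Decidable (Spec_middleanagramm word1 word2 out) := by unfold Spec_middleanagramm; infer_instance

-- ===== CLAIM (what is proved, stated in full; the proofs are below) =====
def Claim_equal_middleanagramm : Prop := ∀ (word1 : String) (word2 : String), Dom_middleanagramm word1 word2 → Spec_middleanagramm word1 word2 (middleanagramm word1 word2)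

-- ===== LEMMAS AND PROOFS =====

-- A's loop decides multiset (anagram) equality of the two lists.
theorem middleanagrammLoop_eq_perm (l1 l2 : List Char) :
    middleanagrammLoop l1 l2 = decide (l1.Perm l2) := by
  induction l1 generalizing l2 with
  | nil =>
      cases l2 <;> simp [middleanagrammLoop]
  | cons i rest ih =>
      by_cases h : i ∈ l2
      · rw [show middleanagrammLoop (i :: rest) l2 =
              middleanagrammLoop rest (l2.erase i) by
            simp [middleanagrammLoop, PySem.List.remove?_eq_some_erase l2 i h]]
        rw [ih]
        simp [List.cons_perm_iff_perm_erase, h]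
      · rw [show middleanagrammLoop (i :: rest) l2 = false by
            simp [middleanagrammLoop, (PySem.List.remove?_eq_none_iff (xs := l2) (v := i)).mpr h]]
        have : ¬ (i :: rest).Perm l2 := fun hp => h (hp.mem_iff.mp (List.mem_cons_self ..))
        simp [this]

-- ===== VERDICT (by name: the statement is the Claim_ definition above) =====
theorem middleanagramm_spec : Claim_equal_middleanagramm := by
  intro word1 word2 _
  unfold Spec_middleanagramm middleanagramm middleanagramm_alt
  rw [middleanagrammLoop_eq_perm, Bool.eq_iff_iff]
  simp [PySem.List.sorted_id_eq_sorted_id_iff_perm]
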